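-- pv_equiv track=rewrite | github.com/owais-ch/Arrays | Perfect Peak of Array.py | perfectPeak
-- ===== SOURCE A (Python) =====
-- def perfectPeak(A):
--     maximum=A[0]
--     minimum=min(A[2:])
--     length=len(A)
--
--     for i in range(1,length-1):
--
--         if A[i]>maximum and A[i]<minimum:
--             return 1
--         if A[i]>maximum:
--             maximum=A[i]
--
--         if i+2<length:
--             if A[i+1]==minimum:
--                 minimum=min(A[i+2:])
--         else:
--             break
--
--
--     return 0
-- ===== SOURCE B (Python) =====
-- def perfectPeak(A):
--     n = len(A)
--     if n < 3:
--         return 0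
--     # suffix minima: suff[j] = min(A[j:]), built back-to-front in one pass
--     suff = []
--     cur = None
--     for x in reversed(A):
--         cur = x if cur is None else min(cur, x)
--         suff.append(cur)
--     suff.reverse()
--     mx = A[0]
--     for i in range(1, n - 1):
--         v = A[i]
--         if v > mx:
--             if v < suff[i + 1]:
--                 return 1
--             mx = v
--     return 0
-- ===== Notes on version B (the rewrite author's own statement) =====
-- stated objective: faster
-- what changed: B precomputes the suffix-minimum array in one backward pass and then does a single forward scan with a running prefix maximum, instead of A's loop that repeatedly recomputes min(A[i+2:]) with a nested scan.
-- crash fix: On lists with fewer than 3 elements A raises (an IndexError or a ValueError from min of an empty slice); B returns 0 since no interior peak index can exist. — e.g. on perfectPeak([5]): A raises ValueError, B returns 0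
import Mathlib
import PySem

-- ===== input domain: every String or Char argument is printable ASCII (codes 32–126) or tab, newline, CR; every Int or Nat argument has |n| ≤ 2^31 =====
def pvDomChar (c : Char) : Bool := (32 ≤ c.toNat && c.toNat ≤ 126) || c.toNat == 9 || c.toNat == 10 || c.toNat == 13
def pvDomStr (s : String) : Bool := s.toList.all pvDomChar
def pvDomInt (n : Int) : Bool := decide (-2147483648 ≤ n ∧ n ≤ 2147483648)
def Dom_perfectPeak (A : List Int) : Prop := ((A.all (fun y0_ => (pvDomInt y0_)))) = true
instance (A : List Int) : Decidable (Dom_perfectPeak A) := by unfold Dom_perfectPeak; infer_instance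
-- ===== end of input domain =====

-- B replaces A's repeated min(A[i+2:]) rescans by a precomputed suffix-minimum array
-- and one forward scan (objective: faster, asymptotic O(n) vs O(n^2)).


-- ===== PORT A =====
-- the for-loop of A: state (maximum, minimum), early return 1, break returns 0
def perfectPeakLoop (A : List Int) (length : Int) : List Int → Int → Int → Int
  | [], _, _ => 0
  | i :: rest, maximum, minimum =>
    let ai := PySem.List.pyGetD A i 0
    if ai > maximum ∧ ai < minimum then 1
    else
      let maximum' := if ai > maximum then ai else maximum
      if i + 2 < length then
        let minimum' :=
          if PySem.List.pyGetD A (i + 1) 0 = minimum then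
            (PySem.List.min? (PySem.List.slice A (some (i + 2)) none) (fun y => y)).getD minimum
          else minimum
        perfectPeakLoop A length rest maximum' minimum'
      else 0

def perfectPeak (A : List Int) : Int :=
  let maximum := PySem.List.pyGetD A 0 0
  let minimum := (PySem.List.min? (PySem.List.slice A (some 2) none) (fun y => y)).getD 0
  let length : Int := A.length
  perfectPeakLoop A length (PySem.List.pyRange 1 (length - 1) 1) maximum minimum

-- ===== PORT B =====
-- one step of Source B's backward pass: state (suff so far, current running min)
def altStep (st : List Int × Option Int) (x : Int) : List Int × Option Int :=
  let cur := match st.2 with | none => x | some c => min c x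
  (st.1 ++ [cur], some cur)

-- Source B: suff built over reversed(A), then reversed; suff[j] = min(A[j:])
def suffOf (A : List Int) : List Int :=
  ((A.reverse.foldl altStep ([], none)).1).reverse

-- Source B's forward scan with running prefix max
def altScan (A suff : List Int) : List Int → Int → Int
  | [], _ => 0
  | i :: rest, mx =>
    let v := PySem.List.pyGetD A i 0
    if v > mx then
      if v < PySem.List.pyGetD suff (i + 1) 0 then 1
      else altScan A suff rest v
    else altScan A suff rest mx

def perfectPeak_alt (A : List Int) : Int :=
  let n := A.length
  if n < 3 then 0
  else
    let suff := suffOf A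
    let mx := PySem.List.pyGetD A 0 0
    altScan A suff (PySem.List.pyRange 1 ((n : Int) - 1) 1) mx

-- ===== PRECONDITION & SPEC =====
-- A raises on lists of length < 3 (IndexError on [], ValueError from min([]) otherwise)
def Pre_perfectPeak (A : List Int) : Prop := 3 ≤ A.length
instance (A : List Int) : Decidable (Pre_perfectPeak A) := by unfold Pre_perfectPeak; infer_instance
def pvWitness_perfectPeak : List Int := [1, 3, 2, 4]

-- On lists with fewer than 3 elements A raises (IndexError or ValueError); B returns 0 since no interior peak index can exist (theorem perfectPeak_raises below).
def Raises_perfectPeak (A : List Int) : Prop := A.length < 3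
instance (A : List Int) : Decidable (Raises_perfectPeak A) := by unfold Raises_perfectPeak; infer_instance
def pvRaiseWitness_perfectPeak : List Int := [5]
def pvRaiseWitnessOut_perfectPeak : Int := 0

def Spec_perfectPeak (A : List Int) (out : Int) : Prop := out = perfectPeak_alt A
instance (A : List Int) (out : Int) : Decidable (Spec_perfectPeak A out) := by unfold Spec_perfectPeak; infer_instance

-- ===== CLAIM (what is proved, stated in full; the proofs are below) =====
def Claim_equal_perfectPeak : Prop := ∀ (A : List Int), Dom_perfectPeak A → Pre_perfectPeak A → Spec_perfectPeak A (perfectPeak A)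
def Claim_raises_perfectPeak : Prop := (∀ (A : List Int), Dom_perfectPeak A → Raises_perfectPeak A → ¬ Pre_perfectPeak A) ∧ (Dom_perfectPeak (pvRaiseWitness_perfectPeak) ∧ Raises_perfectPeak (pvRaiseWitness_perfectPeak) ∧ perfectPeak_alt (pvRaiseWitness_perfectPeak) = pvRaiseWitnessOut_perfectPeak)

-- ===== LEMMAS AND PROOFS =====

-- min of a nonempty Python list, head as seed (0 only for [])
def pvSm : List Int → Int
  | [] => 0
  | x :: t => t.foldl min x

-- running minima of l seeded by c (what Source B's backward pass appends, in reverse order)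
def pvRmin : Int → List Int → List Int
  | _, [] => []
  | c, x :: t => min c x :: pvRmin (min c x) t

theorem pv_foldl_min_assoc (r : List Int) (a b : Int) :
    r.foldl min (min a b) = min a (r.foldl min b) := by
  induction r generalizing b with
  | nil => rfl
  | cons c r ih =>
      simp only [List.foldl_cons]
      rw [min_assoc, ih]

theorem pvSm_cons_ne (x : Int) (t : List Int) (ht : t ≠ []) :
    pvSm (x :: t) = min x (pvSm t) := by
  cases t with
  | nil => exact absurd rfl ht
  | cons y r => simp only [pvSm, List.foldl_cons]; exact pv_foldl_min_assoc r x y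

theorem pv_length_rmin (c : Int) (l : List Int) : (pvRmin c l).length = l.length := by
  induction l generalizing c with
  | nil => rfl
  | cons x t ih => simp [pvRmin, ih]

theorem pv_rmin_getD (l : List Int) (c : Int) (i : Nat) (h : i < l.length) :
    (pvRmin c l).getD i 0 = (l.take (i + 1)).foldl min c := by
  induction l generalizing c i with
  | nil => simp at h
  | cons y t ih =>
      cases i with
      | zero => simp [pvRmin]
      | succ i =>
          simp only [pvRmin, List.getD_cons_succ, List.take_succ_cons, List.foldl_cons]
          exact ih (min c y) i (by simpa using h)

theorem pv_fold_altStep (l : List Int) (acc : List Int) (c : Int) :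
    l.foldl altStep (acc, some c) = (acc ++ pvRmin c l, some (l.foldl min c)) := by
  induction l generalizing acc c with
  | nil => simp [pvRmin]
  | cons x t ih =>
      simp only [List.foldl_cons, altStep, pvRmin]
      rw [ih]
      simp

theorem pvSm_rev_append (l : List Int) (x : Int) (r : List Int) :
    pvSm (l.reverse ++ x :: r) = r.foldl min (l.foldl min x) := by
  induction l generalizing x r with
  | nil => simp [pvSm]
  | cons a l ih =>
      have : (a :: l).reverse ++ x :: r = l.reverse ++ a :: x :: r := by simp
      rw [this, ih a (x :: r)]
      simp only [List.foldl_cons]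
      rw [pv_foldl_min_assoc l x a, min_comm x (l.foldl min a)]

theorem pv_suff_spec (A : List Int) (hA : A ≠ []) (j : Nat) (hj : j < A.length) :
    (suffOf A).getD j 0 = pvSm (A.drop j) := by
  obtain ⟨x, t, hxt⟩ : ∃ x t, A.reverse = x :: t := by
    cases h : A.reverse with
    | nil => exact absurd (by simpa using congrArg List.reverse h) hA
    | cons x t => exact ⟨x, t, rfl⟩
  have hA' : A = t.reverse ++ [x] := by
    have := congrArg List.reverse hxt; simpa using this
  have hlen : A.length = t.length + 1 := by rw [hA']; simp
  have hfold : suffOf A = (x :: pvRmin x t).reverse := by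
    unfold suffOf
    rw [hxt]
    simp only [List.foldl_cons, altStep]
    rw [pv_fold_altStep]
    simp
  rw [hfold]
  have hlen2 : (x :: pvRmin x t).length = t.length + 1 := by simp [pv_length_rmin]
  have hjt : j ≤ t.length := by omega
  -- reverse indexing
  have hrev : ((x :: pvRmin x t).reverse).getD j 0 = (x :: pvRmin x t).getD (t.length - j) 0 := by
    rw [List.getD_eq_getElem?_getD, List.getD_eq_getElem?_getD,
        List.getElem?_reverse (by omega)]
    have hidx : (x :: pvRmin x t).length - 1 - j = t.length - j := by
      simp [pv_length_rmin]
    rw [hidx]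
  rw [hrev]
  rcases Nat.eq_or_lt_of_le hjt with hje | hjlt
  · -- j = t.length : last suffix [x]
    subst hje
    have hd : A.drop t.length = [x] := by
      rw [hA', List.drop_append_of_le_length (by simp)]
      simp
    rw [Nat.sub_self, List.getD_cons_zero, hd]
    rfl
  · -- j < t.length
    have hk : t.length - j = (t.length - j - 1) + 1 := by omega
    rw [hk, List.getD_cons_succ]
    rw [pv_rmin_getD t x _ (by omega)]
    have hk2 : t.length - j - 1 + 1 = t.length - j := by omega
    rw [hk2]
    -- A.drop j = (t.take (t.length - j)).reverse ++ [x]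
    have hdrop : A.drop j = (t.take (t.length - j)).reverse ++ [x] := by
      rw [hA', List.drop_append_of_le_length (by simp; omega)]
      congr 1
      rw [List.drop_reverse]
    rw [hdrop]
    have h := pvSm_rev_append (t.take (t.length - j)) x []
    simp only [List.foldl_nil] at h
    exact h.symm

-- main loop correspondence: A's loop with invariant minimum = pvSm (A.drop (k+1))
-- equals Source B's scan over the same index range
theorem pv_loop_eq (A : List Int) (suff : List Int)
    (hsuff : ∀ j : Nat, j < A.length → suff.getD j 0 = pvSm (A.drop j)) :
    ∀ (m k : Nat), 1 ≤ k → 3 ≤ A.length → A.length - 1 - k ≤ m → ∀ mx : Int,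
    perfectPeakLoop A (A.length : Int) (PySem.List.pyRange (k : Int) ((A.length : Int) - 1) 1) mx (pvSm (A.drop (k + 1)))
      = altScan A suff (PySem.List.pyRange (k : Int) ((A.length : Int) - 1) 1) mx := by
  intro m
  induction m with
  | zero =>
      intro k hk hn hm mx
      have : (A.length : Int) - 1 ≤ (k : Int) := by omega
      rw [PySem.List.pyRange_one_eq_nil this]
      rfl
  | succ m ih =>
      intro k hk hn hm mx
      by_cases hend : (A.length : Int) - 1 ≤ (k : Int)
      · rw [PySem.List.pyRange_one_eq_nil hend]; rfl
      · rw [not_le] at hend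
        have hklt : k + 1 < A.length := by omega
        rw [PySem.List.pyRange_one_cons hend]
        have hnext : ((k : Int) + 1) = ((k + 1 : Nat) : Int) := by push_cast; ring
        -- common values
        have hvA : PySem.List.pyGetD A (k : Int) 0 = A.getD k 0 := by
          simp [PySem.List.pyGetD_natCast]
        have hsv : PySem.List.pyGetD suff ((k : Int) + 1) 0 = pvSm (A.drop (k + 1)) := by
          rw [hnext, PySem.List.pyGetD_natCast]
          exact hsuff (k + 1) hklt
        set v := A.getD k 0 with hv
        set mn := pvSm (A.drop (k + 1)) with hmn
        simp only [perfectPeakLoop, altScan, hvA, hsv]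
        by_cases h1 : v > mx ∧ v < mn
        · rw [if_pos h1, if_pos h1.1, if_pos h1.2]
        · rw [if_neg h1]
          by_cases hlast : (k : Int) + 2 < (A.length : Int)
          · -- not the last iteration: recompute minimum as needed, recurse
            rw [if_pos hlast]
            have hk2 : k + 2 < A.length := by omega
            have hdropne : A.drop (k + 2) ≠ [] := by
              intro h
              have := congrArg List.length h
              simp at this; omega
            -- the slice min is pvSm (A.drop (k+2))
            have hslice : PySem.List.slice A (some ((k : Int) + 2)) none = A.drop (k + 2) := by
              rw [PySem.List.slice_from A (a := (k : Int) + 2) (by omega)]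
              congr 1
            have hmin2 : (PySem.List.min? (PySem.List.slice A (some ((k : Int) + 2)) none) (fun y => y)).getD mn = pvSm (A.drop (k + 2)) := by
              rw [hslice]
              cases hd : A.drop (k + 2) with
              | nil => exact absurd hd hdropne
              | cons y r => rw [PySem.List.min?_id_cons]; simp [pvSm]
            -- A[k+1] is the head of the (k+1)-suffix
            have hget1 : PySem.List.pyGetD A ((k : Int) + 1) 0 = A.getD (k + 1) 0 := by
              rw [hnext, PySem.List.pyGetD_natCast]
            have hdecomp : A.drop (k + 1) = A.getD (k + 1) 0 :: A.drop (k + 2) := by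
              rw [List.getD_eq_getElem _ _ hklt, List.drop_eq_getElem_cons hklt]
            have hmnsplit : mn = min (A.getD (k + 1) 0) (pvSm (A.drop (k + 2))) := by
              rw [hmn, hdecomp, pvSm_cons_ne _ _ hdropne]
            -- either branch yields pvSm (A.drop (k+2))
            have hmin' : (if PySem.List.pyGetD A ((k : Int) + 1) 0 = mn then (PySem.List.min? (PySem.List.slice A (some ((k : Int) + 2)) none) (fun y => y)).getD mn else mn) = pvSm (A.drop (k + 2)) := by
              rw [hget1]
              by_cases he : A.getD (k + 1) 0 = mn
              · rw [if_pos he]; exact hmin2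
              · rw [if_neg he]
                rcases min_choice (A.getD (k + 1) 0) (pvSm (A.drop (k + 2))) with hc | hc
                · exact absurd (hmnsplit.trans hc).symm he
                · rw [hmnsplit, hc]
            rw [hmin']
            have hrec := ih (k + 1) (by omega) hn (by omega)
            rw [hnext]
            by_cases h2 : v > mx
            · have h3 : ¬ v < mn := fun h => h1 ⟨h2, h⟩
              rw [if_pos h2, if_pos h2, if_neg h3]
              exact hrec v
            · rw [if_neg h2, if_neg h2]
              exact hrec mx
          · -- last iteration: A breaks (returns 0), B's remaining range is empty
            rw [if_neg hlast]
            have hklast : (k : Int) = (A.length : Int) - 2 := by omega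
            have hempty : PySem.List.pyRange ((k : Int) + 1) ((A.length : Int) - 1) 1 = [] :=
              PySem.List.pyRange_one_eq_nil (by omega)
            rw [hempty]
            by_cases h2 : v > mx
            · have h3 : ¬ v < mn := fun h => h1 ⟨h2, h⟩
              rw [if_pos h2, if_neg h3]
              rfl
            · rw [if_neg h2]
              rfl

-- ===== VERDICT (by name: the statement is the Claim_ definition above) =====
theorem perfectPeak_spec : Claim_equal_perfectPeak := by
  intro A _hdom hpre
  unfold Spec_perfectPeak
  have hn : 3 ≤ A.length := hpre
  have hA : A ≠ [] := by intro h; rw [h] at hn; simp at hn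
  -- initial minimum = pvSm (A.drop 2)
  have hdropne : A.drop 2 ≠ [] := by
    intro h; have := congrArg List.length h; simp at this; omega
  have hslice : PySem.List.slice A (some 2) none = A.drop 2 := by
    rw [PySem.List.slice_from A (a := 2) (by omega)]
    rfl
  have hmin0 : (PySem.List.min? (PySem.List.slice A (some 2) none) (fun y => y)).getD 0 = pvSm (A.drop 2) := by
    rw [hslice]
    cases hd : A.drop 2 with
    | nil => exact absurd hd hdropne
    | cons y r => rw [PySem.List.min?_id_cons]; simp [pvSm]
  unfold perfectPeak perfectPeak_alt
  simp only [hmin0]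
  rw [if_neg (by omega)]
  have h1 : ((1 : Int)) = ((1 : Nat) : Int) := by norm_num
  have := pv_loop_eq A (suffOf A) (fun j hj => pv_suff_spec A hA j hj)
    (A.length) 1 (le_refl 1) hn (by omega) (PySem.List.pyGetD A 0 0)
  rw [h1]
  exact this

@[simp] theorem perfectPeak_raises : Claim_raises_perfectPeak := by
  unfold Claim_raises_perfectPeak
  constructor
  · intro A _ hr hp
    exact absurd hp (by unfold Pre_perfectPeak Raises_perfectPeak at *; omega)
  · exact ⟨by decide, by decide, by decide⟩
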